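-- pv_equiv track=rewrite | github.com/MikeDesmarais/acquire | server/logs_to_games.py | get_player_id_to_ranking
-- ===== SOURCE A (Python) =====
-- def get_player_id_to_ranking(score):
--     player_id_to_ranking = {}
--     last_amount = None
--     last_ranking = None
--     for player_id, amount in sorted(enumerate(score), key=lambda x: -x[1]):
--         if amount == last_amount:
--             ranking = last_ranking
--         else:
--             ranking = len(player_id_to_ranking) + 1
--         last_amount = amount
--         last_ranking = ranking
--         player_id_to_ranking[player_id] = ranking
--
--     return player_id_to_ranking
-- ===== SOURCE B (Python) =====
-- def get_player_id_to_ranking(score):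
--     # rank of a player = 1 + number of strictly greater scores, found by binary
--     # search (bisect-right) in an ascending-sorted copy; no sequential rank state.
--     # The sort of the enumeration only fixes the dict's insertion order (as A's).
--     asc = sorted(score)
--     n = len(asc)
--
--     def rank(a):
--         lo, hi = 0, n
--         while lo < hi:
--             mid = (lo + hi) // 2
--             if asc[mid] <= a:
--                 lo = mid + 1
--             else:
--                 hi = mid
--         return 1 + (n - lo)
--
--     return {i: rank(a) for i, a in sorted(enumerate(score), key=lambda x: -x[1])}
-- ===== Notes on version B (the rewrite author's own statement) =====
-- stated objective: alternative
-- what changed: Replaces A's stateful sorted-order scan (last_amount/last_ranking carried across iterations) with an order-statistics computation: each player's rank is 1 + the number of strictly greater scores, obtained by binary search (bisect-right) in an ascending-sorted copy; the sorted enumeration is kept only to reproduce the dict insertion order.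
import Mathlib
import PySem

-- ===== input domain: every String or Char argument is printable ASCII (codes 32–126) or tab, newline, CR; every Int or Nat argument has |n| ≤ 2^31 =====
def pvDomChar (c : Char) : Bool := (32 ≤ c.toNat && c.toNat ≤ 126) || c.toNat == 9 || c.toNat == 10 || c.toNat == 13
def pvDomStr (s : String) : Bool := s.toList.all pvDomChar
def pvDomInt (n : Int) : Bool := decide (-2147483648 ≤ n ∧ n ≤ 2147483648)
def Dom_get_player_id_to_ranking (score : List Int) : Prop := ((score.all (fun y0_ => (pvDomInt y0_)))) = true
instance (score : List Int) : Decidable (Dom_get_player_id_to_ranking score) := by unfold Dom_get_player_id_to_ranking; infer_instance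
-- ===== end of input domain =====

-- B drops A's stateful sorted-order scan: each player's rank is 1 + the count of strictly
-- greater scores, found by binary search in an ascending-sorted copy (the sort of the
-- enumeration only fixes dict insertion order).
-- Return value only; no argument is mutated.

-- ===== PORT A =====
-- one pass over the sorted enumeration, carrying (dict, last_amount, last_ranking);
-- `lastR.getD 0` is only reached when lastR is `some` (Python reads last_ranking there)
def get_player_id_to_ranking (score : List Int) : List (Int × Int) :=
  (((PySem.List.sorted (PySem.List.enumerate score) (fun x => -x.2) false).foldl
      (fun (st : PySem.Dict Int Int × Option Int × Option Int) pa =>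
        let ranking : Int :=
          if (some pa.2 : Option Int) == st.2.1 then st.2.2.getD 0
          else (st.1.size : Int) + 1
        (st.1.insert pa.1 ranking, some pa.2, some ranking))
      (PySem.Dict.empty, none, none)).1).items

-- ===== PORT B =====
-- dict comprehension over the sorted enumeration; rank(a) is a hand-written
-- bisect-right over the ascending-sorted copy `asc` (index mid is always in range,
-- so `getD mid 0` reads exactly the element Python's asc[mid] reads)
def pvBS (asc : List Int) (a : Int) (lo hi : Nat) : Nat :=
  if lo < hi then
    let mid := (lo + hi) / 2
    if asc.getD mid 0 ≤ a then pvBS asc a (mid + 1) hi else pvBS asc a lo mid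
  else lo
termination_by hi - lo
decreasing_by all_goals omega

def get_player_id_to_ranking_alt (score : List Int) : List (Int × Int) :=
  let asc := PySem.List.sorted score (fun s => s) false
  let n := score.length
  ((PySem.List.sorted (PySem.List.enumerate score) (fun x => -x.2) false).foldl
      (fun (d : PySem.Dict Int Int) ia =>
        d.insert ia.1 (1 + ((n : Int) - (pvBS asc ia.2 0 n : Int))))
      PySem.Dict.empty).items

-- ===== PRECONDITION & SPEC =====
def Spec_get_player_id_to_ranking (score : List Int) (out : List (Int × Int)) : Prop := out = get_player_id_to_ranking_alt score
instance (score : List Int) (out : List (Int × Int)) : Decidable (Spec_get_player_id_to_ranking score out) := by unfold Spec_get_player_id_to_ranking; infer_instance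

-- ===== CLAIM (what is proved, stated in full; the proofs are below) =====
def Claim_equal_get_player_id_to_ranking : Prop := ∀ (score : List Int), Dom_get_player_id_to_ranking score → Spec_get_player_id_to_ranking score (get_player_id_to_ranking score)

-- ===== LEMMAS AND PROOFS =====

def pvR (O : List (Int × Int)) (a : Int) : Int :=
  1 + (O.countP (fun q => decide (a < q.2)) : Int)

lemma pv_getLast_le (P : List (Int × Int)) (t : Int × Int)
    (h : P.Pairwise (fun x y => y.2 ≤ x.2)) (ht : P.getLast? = some t) :
    ∀ q ∈ P, t.2 ≤ q.2 := by
  induction P with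
  | nil => simp at ht
  | cons a P ih =>
    rcases List.pairwise_cons.mp h with ⟨ha, hP⟩
    cases P with
    | nil =>
      simp at ht; subst ht; intro q hq; simp at hq; subst hq; rfl
    | cons b P' =>
      rw [List.getLast?_cons_cons] at ht
      intro q hq
      rcases List.mem_cons.mp hq with rfl | hq'
      · exact le_trans (ha t (List.mem_of_getLast? ht)) le_rfl
      · exact ih hP ht q hq'

lemma pv_count_gt (P L : List (Int × Int)) (p : Int × Int)
    (hdesc : (P ++ p :: L).Pairwise (fun x y => y.2 ≤ x.2))
    (hne : p.2 ∉ P.map (·.2)) :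
    ((P ++ p :: L).countP (fun q => decide (p.2 < q.2)) : Int) = P.length := by
  rcases List.pairwise_append.mp hdesc with ⟨hP, hL, hPL⟩
  rw [List.countP_append, List.countP_cons]
  have h1 : P.countP (fun q => decide (p.2 < q.2)) = P.length := by
    apply List.countP_eq_length.mpr
    intro q hq
    have hle : p.2 ≤ q.2 := hPL q hq p (List.mem_cons_self)
    have hne' : p.2 ≠ q.2 := fun h => hne (by simpa [h] using List.mem_map_of_mem (f := (·.2)) hq)
    simp only [decide_eq_true_eq]; exact lt_of_le_of_ne hle hne'
  have h2 : L.countP (fun q => decide (p.2 < q.2)) = 0 := by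
    apply List.countP_eq_zero.mpr
    intro q hq
    have := (List.pairwise_cons.mp hL).1 q hq
    simpa using not_lt.mpr this
  simp [h1, h2]

-- A's loop step
def pvStepA (st : PySem.Dict Int Int × Option Int × Option Int) (pa : Int × Int) :
    PySem.Dict Int Int × Option Int × Option Int :=
  let ranking : Int :=
    if (some pa.2 : Option Int) == st.2.1 then st.2.2.getD 0
    else (st.1.size : Int) + 1
  (st.1.insert pa.1 ranking, some pa.2, some ranking)

lemma pv_stepA (O P L : List (Int × Int)) (p : Int × Int)
    (hdesc : O.Pairwise (fun x y => y.2 ≤ x.2))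
    (hnd : (O.map (·.1)).Nodup) (hP : O = P ++ p :: L) :
    pvStepA (PySem.Dict.mk (P.map (fun q => (q.1, pvR O q.2))),
        (P.getLast?).map (·.2), (P.getLast?).map (fun q => pvR O q.2)) p =
        (PySem.Dict.mk ((P ++ [p]).map (fun q => (q.1, pvR O q.2))),
         ((P ++ [p]).getLast?).map (·.2), ((P ++ [p]).getLast?).map (fun q => pvR O q.2)) := by
  have hdescP : (P ++ p :: L).Pairwise (fun x y => y.2 ≤ x.2) := hP ▸ hdesc
  have hrank : (if (some p.2 : Option Int) == (P.getLast?).map (·.2) then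
      ((P.getLast?).map (fun q => pvR O q.2)).getD 0
      else ((PySem.Dict.mk (P.map (fun q => (q.1, pvR O q.2)))).size : Int) + 1) = pvR O p.2 := by
    by_cases hc : (some p.2 : Option Int) == (P.getLast?).map (·.2)
    · rw [if_pos hc]
      cases ht : P.getLast? with
      | none => simp [ht] at hc
      | some t =>
        have : p.2 = t.2 := by simpa [ht] using hc
        simp [this]
    · rw [if_neg hc]
      have hne : p.2 ∉ P.map (·.2) := by
        intro hmem
        rcases List.mem_map.mp hmem with ⟨q, hq, hq2⟩
        cases ht : P.getLast? with
        | none => simp [List.getLast?_eq_none_iff.mp ht] at hq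
        | some t =>
          rcases List.pairwise_append.mp hdescP with ⟨hPp, _, hPL⟩
          have h1 : t.2 ≤ q.2 := pv_getLast_le P t hPp ht q hq
          have h2 : p.2 ≤ t.2 := hPL t (List.mem_of_getLast? ht) p List.mem_cons_self
          have : p.2 = t.2 := le_antisymm h2 (hq2 ▸ h1)
          exact absurd (by simp [ht, this]) hc
      have hcount := pv_count_gt P L p hdescP hne
      have hsize : ((PySem.Dict.mk (P.map (fun q => (q.1, pvR O q.2)))).size : Int) = P.length := by
        simp [PySem.Dict.size]
      rw [hsize, pvR, hP, hcount]; ring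
  have hfresh : (PySem.Dict.mk (P.map (fun q => (q.1, pvR O q.2)))).contains p.1 = false := by
    have hnd' : ((P ++ p :: L).map (·.1)).Nodup := hP ▸ hnd
    rw [List.map_append, List.map_cons] at hnd'
    have hk : p.1 ∉ (PySem.Dict.mk (P.map (fun q => (q.1, pvR O q.2)))).keys := by
      simp only [PySem.Dict.keys_mk]
      intro hmem
      rcases List.mem_map.mp hmem with ⟨r, hr, hr1⟩
      rcases List.mem_map.mp hr with ⟨q, hq, rfl⟩
      exact (List.nodup_append.mp hnd').2.2 p.1
        (List.mem_map.mpr ⟨q, hq, by simpa using hr1⟩) p.1 List.mem_cons_self rfl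
    rw [← Bool.not_eq_true]
    rw [PySem.Dict.contains_iff_mem_keys]
    exact hk
  simp only [pvStepA, hrank]
  refine Prod.ext ?_ (by simp)
  apply PySem.Dict.ext
  rw [PySem.Dict.items_insert_of_not_contains _ _ hfresh]
  simp

lemma pv_foldA (O : List (Int × Int)) (hdesc : O.Pairwise (fun x y => y.2 ≤ x.2))
    (hnd : (O.map (·.1)).Nodup) :
    ∀ L P, O = P ++ L →
    (L.foldl pvStepA (PySem.Dict.mk (P.map (fun q => (q.1, pvR O q.2))),
        (P.getLast?).map (·.2), (P.getLast?).map (fun q => pvR O q.2))).1 =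
      PySem.Dict.mk (O.map (fun q => (q.1, pvR O q.2))) := by
  intro L
  induction L with
  | nil => intro P hP; simp [hP]
  | cons p L ih =>
    intro P hP
    rw [List.foldl_cons]
    have hstep : pvStepA (PySem.Dict.mk (P.map (fun q => (q.1, pvR O q.2))),
        (P.getLast?).map (·.2), (P.getLast?).map (fun q => pvR O q.2)) p =
        (PySem.Dict.mk ((P ++ [p]).map (fun q => (q.1, pvR O q.2))),
         ((P ++ [p]).getLast?).map (·.2), ((P ++ [p]).getLast?).map (fun q => pvR O q.2)) :=
      pv_stepA O P L p hdesc hnd hP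
    rw [hstep]
    have := ih (P ++ [p]) (by simp [hP])
    simpa using this

-- the count over the sorted enumeration equals the count over score itself
lemma pv_count_perm (score : List Int) (a : Int) :
    ((PySem.List.sorted (PySem.List.enumerate score) (fun x => -x.2) false).countP
        (fun q => decide (a < q.2)) : Int)
      = (score.countP (fun s => decide (a < s)) : Int) := by
  have hperm := PySem.List.sorted_perm (PySem.List.enumerate score) (fun x => -x.2) false
  rw [hperm.countP_eq]
  have : (PySem.List.enumerate score).countP (fun q => decide (a < q.2))
      = ((PySem.List.enumerate score).map (·.2)).countP (fun s => decide (a < s)) := by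
    rw [List.countP_map]; rfl
  rw [this, PySem.List.map_snd_enumerate]

-- binary-search correctness: on a sorted list, pvBS computes length - (count of strictly greater)
lemma pvBS_spec (asc : List Int) (a : Int)
    (hmono : ∀ i j : Nat, i ≤ j → j < asc.length → asc.getD i 0 ≤ asc.getD j 0) :
    ∀ lo hi : Nat, lo ≤ hi → hi ≤ asc.length →
    (∀ i : Nat, i < lo → asc.getD i 0 ≤ a) →
    (∀ i : Nat, hi ≤ i → i < asc.length → a < asc.getD i 0) →
    ∀ {n : Nat}, hi - lo ≤ n →
    (pvBS asc a lo hi : Int) = (asc.length : Int) - (asc.countP (fun s => decide (a < s)) : Int) := by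
  intro lo hi hlh hhn hlow hhigh n
  induction n generalizing lo hi with
  | zero =>
    intro hk
    have hle : lo = hi := by omega
    rw [pvBS, if_neg (by omega)]
    -- every index < lo is ≤ a, every index ≥ lo is > a: count of (a < ·) is length - lo
    have hcnt : asc.countP (fun s => decide (a < s)) = asc.length - lo := by
      have hsplit : asc = asc.take lo ++ asc.drop lo := (List.take_append_drop lo asc).symm
      have h1 : (asc.take lo).countP (fun s => decide (a < s)) = 0 := by
        apply List.countP_eq_zero.mpr
        intro x hx
        rcases List.mem_iff_getElem.mp hx with ⟨i, hi, rfl⟩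
        have hi' : i < lo := lt_of_lt_of_le hi (by simp [List.length_take])
        have hx2 : (asc.take lo)[i] = asc.getD i 0 := by
          rw [List.getElem_take, List.getD_eq_getElem]
        rw [hx2]
        simpa using not_lt.mpr (hlow i hi')
      have h2 : (asc.drop lo).countP (fun s => decide (a < s)) = (asc.drop lo).length := by
        apply List.countP_eq_length.mpr
        intro x hx
        rcases List.mem_iff_getElem.mp hx with ⟨i, hi, rfl⟩
        have hx2 : (asc.drop lo)[i] = asc.getD (lo + i) 0 := by
          rw [List.getElem_drop, List.getD_eq_getElem]
        rw [hx2]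
        have hlen : lo + i < asc.length := by
          have := hi; simp [List.length_drop] at this; omega
        simpa using hhigh (lo + i) (by omega) hlen
      calc asc.countP (fun s => decide (a < s))
          = (asc.take lo).countP (fun s => decide (a < s))
            + (asc.drop lo).countP (fun s => decide (a < s)) := by
              conv_lhs => rw [hsplit]
              rw [List.countP_append]
        _ = (asc.drop lo).length := by rw [h1, h2]; omega
        _ = asc.length - lo := by simp [List.length_drop]
    rw [hcnt]
    have hlo : lo ≤ asc.length := by omega
    omega
  | succ n ih =>
    intro hk
    by_cases hlt : lo < hi
    case neg => exact ih lo hi hlh hhn hlow hhigh (by omega)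
    rw [pvBS, if_pos hlt]
    set mid := (lo + hi) / 2 with hmid
    have hmlo : lo ≤ mid := by omega
    have hmhi : mid < hi := by omega
    by_cases hc : asc.getD mid 0 ≤ a
    · rw [if_pos hc]
      refine ih (mid + 1) hi (by omega) hhn ?_ hhigh (by omega)
      intro i hi'
      exact le_trans (hmono i mid (by omega) (by omega)) hc
    · rw [if_neg hc]
      refine ih lo mid (by omega) (by omega) hlow ?_ (by omega)
      intro i h1 h2
      exact lt_of_lt_of_le (lt_of_not_ge hc) (hmono mid i h1 h2)

theorem pv_main (score : List Int) :
    get_player_id_to_ranking score = get_player_id_to_ranking_alt score := by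
  set O := PySem.List.sorted (PySem.List.enumerate score) (fun x => -x.2) false with hO
  have hdesc : O.Pairwise (fun x y => y.2 ≤ x.2) := by
    have := PySem.List.sorted_pairwise (xs := PySem.List.enumerate score) (key := fun x => -x.2)
    exact this.imp (by intro a b h; omega)
  have hnd : (O.map (·.1)).Nodup := by
    have h1 : ((PySem.List.enumerate score).map (·.1)).Pairwise (· < ·) :=
      List.pairwise_map.mpr (PySem.List.pairwise_lt_enumerate score 0)
    have hnd0 : ((PySem.List.enumerate score).map (·.1)).Nodup := h1.imp ne_of_lt
    exact ((PySem.List.sorted_perm (PySem.List.enumerate score) (fun x => -x.2) false).map (·.1)).nodup_iff.mpr hnd0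
  -- A's side: the fold produces rank pvR O q.2 for each entry q of O
  have hA : get_player_id_to_ranking score = O.map (fun q => (q.1, pvR O q.2)) := by
    show (O.foldl pvStepA (PySem.Dict.empty, none, none)).1.items = _
    have := pv_foldA O hdesc hnd O [] rfl
    simp only [List.map_nil, List.getLast?_nil, Option.map_none] at this
    show (O.foldl pvStepA (PySem.Dict.mk [], none, none)).1.items = _
    rw [this]
  -- B's side
  have hlen : (PySem.List.sorted score (fun s => s) false).length = score.length :=
    (PySem.List.sorted_perm score (fun s => s) false).length_eq
  have hmono : ∀ i j : Nat, i ≤ j → j < (PySem.List.sorted score (fun s => s) false).length →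
      (PySem.List.sorted score (fun s => s) false).getD i 0 ≤ (PySem.List.sorted score (fun s => s) false).getD j 0 := by
    intro i j hij hj
    have hp : (PySem.List.sorted score (fun s => s) false).Pairwise (· ≤ ·) := by
      have := PySem.List.sorted_pairwise (xs := score) (key := fun s => s)
      exact this.imp (by intro a b h; omega)
    rcases eq_or_lt_of_le hij with rfl | hlt
    · rfl
    · rw [List.getD_eq_getElem _ _ (lt_trans hlt hj), List.getD_eq_getElem _ _ hj]
      exact List.pairwise_iff_getElem.mp hp i j _ _ hlt
  have hbs : ∀ a : Int, (pvBS (PySem.List.sorted score (fun s => s) false) a 0 score.length : Int)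
      = (score.length : Int) - (score.countP (fun s => decide (a < s)) : Int) := by
    intro a
    have := pvBS_spec (PySem.List.sorted score (fun s => s) false) a hmono 0 score.length
      (by omega) (by omega) (by intro i h; omega)
      (by intro i h1 h2; rw [hlen] at h2; omega) (n := score.length) (by omega)
    rw [this, hlen, (PySem.List.sorted_perm score (fun s => s) false).countP_eq]
  have hB : get_player_id_to_ranking_alt score = O.map (fun q => (q.1, pvR O q.2)) := by
    show (O.foldl (fun (d : PySem.Dict Int Int) ia =>
        d.insert ia.1 (1 + ((score.length : Int) - (pvBS (PySem.List.sorted score (fun s => s) false) ia.2 0 score.length : Int))))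
        PySem.Dict.empty).items = _
    rw [PySem.Dict.items_foldl_insert_fresh (k := (·.1))
      (v := fun p => 1 + ((score.length : Int) - (pvBS (PySem.List.sorted score (fun s => s) false) p.2 0 score.length : Int)))
      (l := O) (d := PySem.Dict.empty)
      (by intro q hq; simp [PySem.Dict.contains_empty]) hnd]
    rw [show (PySem.Dict.empty : PySem.Dict Int Int).items = [] from rfl, List.nil_append]
    refine List.map_congr_left (fun q _ => ?_)
    refine congrArg (Prod.mk q.1) ?_
    rw [hbs q.2]
    unfold pvR
    rw [← pv_count_perm score q.2, ← hO]
    omega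
  rw [hA, hB]

-- ===== VERDICT (by name: the statement is the Claim_ definition above) =====
theorem get_player_id_to_ranking_spec : Claim_equal_get_player_id_to_ranking := by
  intro score _
  exact pv_main score
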